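-- pv_equiv track=rewrite | github.com/daniel-reich/ubiquitous-fiesta | 6brSyFwWnb9Msu7kX_19.py | pos_neg_sort
-- ===== SOURCE A (Python) =====
-- def pos_neg_sort(lst):
--   if lst==[]:
--     return []
--   ls=[]
--   for i in lst:
--     if i>0:
--       ls.append(i)
--       lst[lst.index(i)]=' '
--   ls=sorted(ls)
--   for i in ls:
--     lst[lst.index(' ')]=i
--   return lst
-- ===== SOURCE B (Python) =====
-- def pos_neg_sort(lst):
--     vals = iter(sorted(x for x in lst if x > 0))
--     for k, x in enumerate(lst):
--         if x > 0:
--             lst[k] = next(vals)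
--     return lst
-- ===== Notes on version B (the rewrite author's own statement) =====
-- stated objective: alternative
-- what changed: B sorts the positives once and writes them back positionally in a single enumerate pass, instead of A's repeated linear lst.index scans that blank slots with a sentinel and refill them.
import Mathlib
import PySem

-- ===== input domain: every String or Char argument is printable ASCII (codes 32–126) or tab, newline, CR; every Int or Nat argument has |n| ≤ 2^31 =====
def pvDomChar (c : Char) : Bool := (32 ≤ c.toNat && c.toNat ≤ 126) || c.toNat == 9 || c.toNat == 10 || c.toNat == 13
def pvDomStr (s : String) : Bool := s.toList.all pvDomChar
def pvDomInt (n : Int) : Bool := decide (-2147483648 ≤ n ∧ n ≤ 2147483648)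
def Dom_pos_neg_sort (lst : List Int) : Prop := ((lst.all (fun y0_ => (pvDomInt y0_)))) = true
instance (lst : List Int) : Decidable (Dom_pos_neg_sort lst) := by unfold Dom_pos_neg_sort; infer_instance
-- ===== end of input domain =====

-- B sorts the positives once and writes them back positionally in one pass, instead of A's
-- repeated lst.index scans with a ' ' sentinel; both A and B mutate the caller's list in
-- Python — the theorems here are about the return value.

-- ===== PORT A =====
-- Python's working list mixes ints and the sentinel ' '; modelled as List (Option Int),
-- none = ' '.  replFirst xs a b replaces the first occurrence of a by b, exactly
-- lst[lst.index(a)] = b (if a is absent Python would raise; that never happens here).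
def replFirst (xs : List (Option Int)) (a b : Option Int) : List (Option Int) :=
  match xs with
  | [] => []
  | x :: t => if x = a then b :: t else x :: replFirst t a b

-- 'for i in lst' over a list mutated in place reads lst[k] afresh each iteration; the
-- length never changes, so it is the fold over indices 0..len-1 below.
def pos_neg_sort (lst : List Int) : List Int :=
  if lst = [] then []
  else
    let st := (List.range lst.length).foldl
      (fun (st : List Int × List (Option Int)) k =>
        match st.2[k]? with
        | some (some v) => if 0 < v then (st.1 ++ [v], replFirst st.2 (some v) none) else st
        | _ => st)
      ([], lst.map some)
    let ls := PySem.List.sorted st.1 (fun x => x) false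
    let cur := ls.foldl (fun c i => replFirst c none (some i)) st.2
    -- at the end every slot holds an int again; getD 0 is only for typing (unreachable default)
    cur.map (fun o => o.getD 0)

-- ===== PORT B =====
-- walk the list consuming the sorted positives as the iterator; the [] branch of the
-- iterator is unreachable (vals has exactly as many elements as there are positives)
def fillPos (lst vs : List Int) : List Int :=
  match lst, vs with
  | [], _ => []
  | x :: t, vs =>
    if 0 < x then
      match vs with
      | v :: vr => v :: fillPos t vr
      | [] => x :: fillPos t []
    else x :: fillPos t vs

def pos_neg_sort_alt (lst : List Int) : List Int :=
  fillPos lst (PySem.List.sorted (lst.filter (fun x => decide (0 < x))) (fun x => x) false)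

-- ===== PRECONDITION & SPEC =====
def Spec_pos_neg_sort (lst : List Int) (out : List Int) : Prop := out = pos_neg_sort_alt lst
instance (lst : List Int) (out : List Int) : Decidable (Spec_pos_neg_sort lst out) := by unfold Spec_pos_neg_sort; infer_instance

-- ===== CLAIM (what is proved, stated in full; the proofs are below) =====
def Claim_equal_pos_neg_sort : Prop := ∀ (lst : List Int), Dom_pos_neg_sort lst → Spec_pos_neg_sort lst (pos_neg_sort lst)

-- ===== LEMMAS AND PROOFS =====

def maskf (x : Int) : Option Int := if 0 < x then none else some x

theorem replFirst_append_of_not_mem (A c : List (Option Int)) (a b : Option Int)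
    (h : a ∉ A) : replFirst (A ++ c) a b = A ++ replFirst c a b := by
  induction A with
  | nil => rfl
  | cons x t ih =>
    simp only [List.mem_cons, not_or] at h
    simp [replFirst, Ne.symm h.1, ih h.2]

theorem maskf_ne_some_pos (y v : Int) (hv : 0 < v) : maskf y ≠ some v := by
  unfold maskf; split_ifs with h
  · simp
  · intro he; simp at he; omega

theorem loopA_inv (lst : List Int) (n : ℕ) (hn : n ≤ lst.length) :
    (List.range n).foldl
      (fun (st : List Int × List (Option Int)) k =>
        match st.2[k]? with
        | some (some v) => if 0 < v then (st.1 ++ [v], replFirst st.2 (some v) none) else st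
        | _ => st)
      ([], lst.map some)
    = ((lst.take n).filter (fun x => decide (0 < x)),
       (lst.take n).map maskf ++ (lst.drop n).map some) := by
  induction n with
  | zero => simp
  | succ n ih =>
    have hn' : n ≤ lst.length := Nat.le_of_succ_le hn
    have hlt : n < lst.length := hn
    rw [List.range_succ, List.foldl_append, ih hn']
    have hdrop : lst.drop n = lst[n] :: lst.drop (n + 1) := List.drop_eq_getElem_cons hlt
    have hlen : ((lst.take n).map maskf).length = n := by
      simp [Nat.min_eq_left hn']
    have hget : ((lst.take n).map maskf ++ (lst.drop n).map some)[n]? = some (some lst[n]) := by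
      rw [List.getElem?_append_right (by omega), hlen, hdrop]
      simp
    have htake : lst.take (n + 1) = lst.take n ++ [lst[n]] := by
      rw [List.take_add_one]; simp [List.getElem?_eq_getElem hlt]
    simp only [List.foldl_cons, List.foldl_nil, hget]
    by_cases hv : 0 < lst[n]
    · have hnm : some lst[n] ∉ (lst.take n).map maskf := by
        intro hm
        rcases List.mem_map.mp hm with ⟨y, _, hy⟩
        exact maskf_ne_some_pos y lst[n] hv hy
      rw [if_pos hv, hdrop]
      simp only [List.map_cons]
      rw [replFirst_append_of_not_mem _ _ _ _ hnm]
      have hrf : replFirst ((some lst[n]) :: (lst.drop (n+1)).map some) (some lst[n]) none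
          = none :: (lst.drop (n+1)).map some := by simp [replFirst]
      have hmv : List.map maskf [lst[n]] = [none] := by simp [maskf, hv]
      have hf : List.filter (fun x => decide (0 < x)) [lst[n]] = [lst[n]] := by simp [hv]
      rw [hrf, htake, List.filter_append, List.map_append, hf, hmv, List.append_assoc,
        List.singleton_append]
    · rw [if_neg hv, hdrop, htake]
      have hmv : List.map maskf [lst[n]] = [some lst[n]] := by simp [maskf, hv]
      have hf : List.filter (fun x => decide (0 < x)) [lst[n]] = [] := by simp [hv]
      rw [List.filter_append, List.map_append, hf, hmv, List.append_nil, List.append_assoc,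
        List.singleton_append, List.map_cons]

theorem foldl_replFirst_nil (vs : List Int) :
    vs.foldl (fun c i => replFirst c none (some i)) [] = [] := by
  induction vs with
  | nil => rfl
  | cons v vr ih => simpa [replFirst] using ih

theorem foldl_replFirst_cons (vs : List Int) (c : List (Option Int)) (a : Int) :
    vs.foldl (fun c i => replFirst c none (some i)) (some a :: c)
      = some a :: vs.foldl (fun c i => replFirst c none (some i)) c := by
  induction vs generalizing c with
  | nil => rfl
  | cons v vr ih => simp [replFirst, ih]

theorem fill_main (lst : List Int) (vs : List Int)
    (h : vs.length = (lst.filter (fun x => decide (0 < x))).length) :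
    (vs.foldl (fun c i => replFirst c none (some i)) (lst.map maskf)).map (fun o => o.getD 0)
      = fillPos lst vs := by
  induction lst generalizing vs with
  | nil => simp [foldl_replFirst_nil, fillPos]
  | cons x t ih =>
    by_cases hx : 0 < x
    · have : maskf x = none := by simp [maskf, hx]
      rcases vs with _ | ⟨v, vr⟩
      · exfalso; simp [hx] at h
      · simp only [List.map_cons, this, List.foldl_cons]
        have hstep : replFirst (none :: t.map maskf) none (some v) = some v :: t.map maskf := by
          simp [replFirst]
        rw [hstep, foldl_replFirst_cons]
        simp only [List.map_cons, Option.getD_some]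
        have h' : vr.length = (t.filter (fun x => decide (0 < x))).length := by
          simp [hx] at h; omega
        rw [ih vr h']
        simp [fillPos, hx]
    · have hm : maskf x = some x := by simp [maskf, hx]
      simp only [List.map_cons, hm, foldl_replFirst_cons]
      have h' : vs.length = (t.filter (fun x => decide (0 < x))).length := by
        simpa [hx] using h
      simp only [Option.getD_some]
      rw [ih vs h']
      simp [fillPos, hx]

-- ===== VERDICT (by name: the statement is the Claim_ definition above) =====
theorem pos_neg_sort_spec : Claim_equal_pos_neg_sort := by
  intro lst _
  unfold Spec_pos_neg_sort pos_neg_sort pos_neg_sort_alt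
  by_cases hnil : lst = []
  · simp [hnil, fillPos]
  · rw [if_neg hnil]
    have hinv := loopA_inv lst lst.length le_rfl
    simp only [List.take_length, List.drop_length, List.map_nil, List.append_nil] at hinv
    rw [hinv]
    exact fill_main lst _ (by rw [PySem.List.length_sorted])
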